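-- pv_equiv track=rewrite | github.com/FinchMF/LSTM_Tweet_Classifier | senti/text_utils.py | encode_words
-- ===== SOURCE A (Python) =====
-- from collections import Counter
--
-- def encode_words(words, tweets_split):
--
--     counts = Counter(words)
--     vocab = sorted(counts, key=counts.get, reverse=True)
--     vocab_to_int = {word: ii for ii, word in enumerate(vocab, 1)}
--
--     tweets_ints = []
--     for tweet in tweets_split:
--         tweets_ints.append([vocab_to_int[word] for word in tweet.split()])
--
--     return vocab_to_int, tweets_ints
-- ===== SOURCE B (Python) =====
-- from collections import Counter
--
-- def encode_words(words, tweets_split):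
--
--     counts = Counter(words)
--
--     # bucket words by frequency (insertion order preserves first-seen tie order)
--     buckets = {}
--     for word, c in counts.items():
--         buckets[c] = buckets.get(c, []) + [word]
--
--     # frequency-ranked vocabulary: distinct counts descending, each bucket in order
--     vocab = []
--     for c in sorted(buckets, reverse=True):
--         vocab.extend(buckets[c])
--
--     vocab_to_int = {}
--     for ii, word in enumerate(vocab, 1):
--         vocab_to_int[word] = ii
--
--     tweets_ints = [[vocab_to_int[word] for word in tweet.split()]
--                    for tweet in tweets_split]
--
--     return vocab_to_int, tweets_ints
-- ===== Notes on version B (the rewrite author's own statement) =====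
-- stated objective: alternative
-- what changed: Replaces the stable descending key-sort of the whole vocabulary by frequency bucketing: words are grouped by count in first-seen order into a dict of buckets, and the vocabulary is emitted by iterating the distinct counts in descending order, which preserves the stable sort's tie order exactly.
import Mathlib
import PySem

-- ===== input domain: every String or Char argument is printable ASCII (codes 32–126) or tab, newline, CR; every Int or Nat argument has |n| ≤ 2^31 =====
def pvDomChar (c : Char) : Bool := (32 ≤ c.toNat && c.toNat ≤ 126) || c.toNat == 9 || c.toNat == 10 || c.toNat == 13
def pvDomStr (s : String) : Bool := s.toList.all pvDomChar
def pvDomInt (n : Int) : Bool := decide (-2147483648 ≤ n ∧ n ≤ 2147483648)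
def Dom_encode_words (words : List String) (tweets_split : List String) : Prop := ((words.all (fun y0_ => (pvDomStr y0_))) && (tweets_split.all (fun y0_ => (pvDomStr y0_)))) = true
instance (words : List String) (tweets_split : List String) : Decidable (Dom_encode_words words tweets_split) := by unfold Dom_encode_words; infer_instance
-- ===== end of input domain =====

-- B replaces A's stable descending key-sort of the vocabulary by frequency bucketing
-- (group words by count in first-seen order, then emit buckets by descending count):
-- an alternative decomposition; tie order (first-seen) is preserved exactly.

-- ===== PORT A =====
def encode_words (words : List String) (tweets_split : List String) : (List (String × Int)) × List (List Int) :=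
  let counts := PySem.Dict.counter words
  let vocab := PySem.List.sorted counts.keys (fun w => counts.getD w 0) true
  let vocab_to_int := (PySem.List.enumerate vocab 1).foldl
    (fun (d : PySem.Dict String Int) p => d.insert p.2 p.1) PySem.Dict.empty
  let tweets_ints := tweets_split.foldl
    (fun acc tweet => acc ++ [(PySem.Str.split₀ tweet).map (fun w => vocab_to_int.getD w 0)]) []
  (vocab_to_int.items, tweets_ints)

-- ===== PORT B =====
def encode_words_alt (words : List String) (tweets_split : List String) : (List (String × Int)) × List (List Int) :=
  let counts := PySem.Dict.counter words
  let buckets := counts.items.foldl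
    (fun (d : PySem.Dict Int (List String)) p => d.modify p.2 [] (fun b => b ++ [p.1])) PySem.Dict.empty
  let vocab := (PySem.List.sorted buckets.keys (fun c => c) true).foldl
    (fun acc c => acc ++ buckets.getD c []) []
  let vocab_to_int := (PySem.List.enumerate vocab 1).foldl
    (fun (d : PySem.Dict String Int) p => d.insert p.2 p.1) PySem.Dict.empty
  (vocab_to_int.items,
   tweets_split.map (fun tweet => (PySem.Str.split₀ tweet).map (fun w => vocab_to_int.getD w 0)))

-- ===== PRECONDITION & SPEC =====
-- Pre_ excludes exactly the inputs where A raises KeyError: a tweet containing a word not in `words`.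
def Pre_encode_words (words : List String) (tweets_split : List String) : Prop :=
  (tweets_split.all (fun t => (PySem.Str.split₀ t).all (fun w => words.contains w))) = true
instance (words : List String) (tweets_split : List String) : Decidable (Pre_encode_words words tweets_split) := by unfold Pre_encode_words; infer_instance
def pvWitness_encode_words : List String × List String := (["a", "b", "a"], ["a b", "b"])

def Spec_encode_words (words : List String) (tweets_split : List String) (out : (List (String × Int)) × List (List Int)) : Prop := out = encode_words_alt words tweets_split
instance (words : List String) (tweets_split : List String) (out : (List (String × Int)) × List (List Int)) : Decidable (Spec_encode_words words tweets_split out) := by unfold Spec_encode_words; infer_instance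

-- ===== CLAIM (what is proved, stated in full; the proofs are below) =====
def Claim_equal_encode_words : Prop := ∀ (words : List String) (tweets_split : List String), Dom_encode_words words tweets_split → Pre_encode_words words tweets_split → Spec_encode_words words tweets_split (encode_words words tweets_split)

-- ===== LEMMAS AND PROOFS =====

-- insertBy steps over a prefix none of whose elements trigger `before`
lemma insertBy_append_not_before {α : Type} (before : α → α → Bool) (x : α) (A B : List α)
    (h : ∀ y ∈ A, before x y = false) :
    PySem.List.insertBy before x (A ++ B) = A ++ PySem.List.insertBy before x B := by
  induction A with
  | nil => rfl
  | cons y t ih =>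
    have hy := h y (by simp)
    simp [PySem.List.insertBy, hy, ih (fun z hz => h z (by simp [hz]))]

-- insertBy puts x in front when every element triggers `before`
lemma insertBy_all_before {α : Type} (before : α → α → Bool) (x : α) (B : List α)
    (h : ∀ y ∈ B, before x y = true) :
    PySem.List.insertBy before x B = x :: B := by
  cases B with
  | nil => rfl
  | cons y t => simp [PySem.List.insertBy, h y (by simp)]

-- inserting x into the bucketed form appends it to the bucket of its key
lemma insertBy_grouped {α : Type} (key : α → Int) (x : α) (l : List α) :
    ∀ (cs : List Int), cs.Pairwise (· > ·) → key x ∈ cs →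
    PySem.List.insertBy (fun a b => decide (key b < key a)) x
      (cs.flatMap (fun c => l.filter (fun y => key y == c))) =
    cs.flatMap (fun c => (l ++ [x]).filter (fun y => key y == c)) := by
  intro cs
  induction cs with
  | nil => simp
  | cons c cs ih =>
    intro hp hm
    have hcs : ∀ c' ∈ cs, c' < c := fun c' hc' => List.rel_of_pairwise_cons hp hc'
    by_cases hx : key x = c
    · rw [List.flatMap_cons, List.flatMap_cons,
        insertBy_append_not_before _ _ _ _
          (by intro y hy
              have : key y = c := by simpa using (List.of_mem_filter hy)
              simp [this, hx]),
        insertBy_all_before _ _ _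
          (by intro y hy
              obtain ⟨c', hc', hy'⟩ := List.mem_flatMap.mp hy
              have : key y = c' := by simpa using (List.of_mem_filter hy')
              simp [this, hx]
              exact hcs c' hc')]
      have h1 : (l ++ [x]).filter (fun y => key y == c) = l.filter (fun y => key y == c) ++ [x] := by
        simp [List.filter_append, hx]
      have h2 : cs.flatMap (fun c' => (l ++ [x]).filter (fun y => key y == c')) =
          cs.flatMap (fun c' => l.filter (fun y => key y == c')) := by
        apply List.flatMap_congr
        intro c' hc'
        have : key x ≠ c' := by
          have := hcs c' hc'; omega
        simp [List.filter_append, this]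
      rw [h1, h2]
      simp
    · have hm' : key x ∈ cs := by
        rcases List.mem_cons.mp hm with h | h
        · exact absurd h hx
        · exact h
      have hlt : key x < c := hcs _ hm'
      rw [List.flatMap_cons, List.flatMap_cons,
        insertBy_append_not_before _ _ _ _
          (by intro y hy
              have : key y = c := by simpa using (List.of_mem_filter hy)
              simp [this]
              omega),
        ih (List.Pairwise.of_cons hp) hm']
      have h1 : (l ++ [x]).filter (fun y => key y == c) = l.filter (fun y => key y == c) := by
        simp [List.filter_append, hx]
      rw [h1]

-- Python's stable reverse sort by an Int key equals bucketing by the (strictly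
-- descending) distinct key values, each bucket kept in original order
lemma sorted_rev_eq_grouped {α : Type} (key : α → Int) (xs : List α) (cs : List Int)
    (hp : cs.Pairwise (· > ·)) (hm : ∀ x ∈ xs, key x ∈ cs) :
    PySem.List.sorted xs key true = cs.flatMap (fun c => xs.filter (fun y => key y == c)) := by
  rw [PySem.List.sorted_rev_eq_foldl_insertBy]
  induction xs using List.reverseRecOn with
  | nil => simp
  | append_singleton l x ih =>
    rw [List.foldl_append, List.foldl_cons, List.foldl_nil,
      ih (fun z hz => hm z (by simp [hz]))]
    exact insertBy_grouped key x l cs hp (hm x (by simp))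

-- the bucket dict's lookup: words of l (in order) whose count-component equals c
lemma getD_bucket (l : List (String × Int)) (d : PySem.Dict Int (List String)) (c : Int) :
    (l.foldl (fun (d : PySem.Dict Int (List String)) p => d.modify p.2 [] (fun b => b ++ [p.1])) d).getD c [] =
    d.getD c [] ++ (l.filter (fun p => p.2 == c)).map (fun p => p.1) := by
  induction l generalizing d with
  | nil => simp
  | cons p t ih =>
    rw [List.foldl_cons, ih]
    by_cases h : c = p.2
    · simp [h]
    · simp [PySem.Dict.getD_modify, h, Ne.symm h]

-- the vocabulary built by A equals the vocabulary built by B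
lemma vocab_eq (words : List String) :
    PySem.List.sorted (PySem.Dict.counter words).keys
      (fun w => (PySem.Dict.counter words).getD w 0) true =
    (PySem.List.sorted ((PySem.Dict.counter words).items.foldl
        (fun (d : PySem.Dict Int (List String)) p => d.modify p.2 [] (fun b => b ++ [p.1])) PySem.Dict.empty).keys
        (fun c => c) true).foldl
      (fun acc c => acc ++ ((PySem.Dict.counter words).items.foldl
        (fun (d : PySem.Dict Int (List String)) p => d.modify p.2 [] (fun b => b ++ [p.1])) PySem.Dict.empty).getD c []) [] := by
  have hkey : (fun w => (PySem.Dict.counter words).getD w 0) =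
      (fun w => ((words.count w : Int))) := funext fun w => PySem.Dict.getD_counter words w
  have hbkeys : ((PySem.Dict.counter words).items.foldl
      (fun (d : PySem.Dict Int (List String)) p => d.modify p.2 [] (fun b => b ++ [p.1])) PySem.Dict.empty).keys =
      PySem.Set.ofList ((PySem.Set.ofList words).map (fun k => ((words.count k : Int)))) := by
    rw [PySem.Dict.keys_foldl_modify_key ((PySem.Dict.counter words).items)
      (fun p : String × Int => p.2) ([] : List String)
      (fun _ p b => b ++ [p.1]) PySem.Dict.empty]
    rw [PySem.Dict.keys_empty, PySem.Set.update_nil_left, PySem.Dict.items_counter, List.map_map]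
    rfl
  have hbget : ∀ c : Int, ((PySem.Dict.counter words).items.foldl
      (fun (d : PySem.Dict Int (List String)) p => d.modify p.2 [] (fun b => b ++ [p.1])) PySem.Dict.empty).getD c [] =
      (PySem.Set.ofList words).filter (fun w => ((words.count w : Int)) == c) := by
    intro c
    rw [getD_bucket, PySem.Dict.items_counter, List.filter_map, List.map_map]
    simp [Function.comp_def]
  rw [hkey, PySem.Dict.keys_counter, PySem.List.foldl_append_eq_flatMap, List.nil_append]
  have hfun : (fun c => ((PySem.Dict.counter words).items.foldl
      (fun (d : PySem.Dict Int (List String)) p => d.modify p.2 [] (fun b => b ++ [p.1])) PySem.Dict.empty).getD c []) =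
      (fun c => (PySem.Set.ofList words).filter (fun w => ((words.count w : Int)) == c)) :=
    funext hbget
  rw [hfun, hbkeys]
  apply sorted_rev_eq_grouped
  · -- the sorted distinct counts are strictly decreasing
    exact ((PySem.List.sorted_pairwise_rev _ _).and
      (((PySem.List.sorted_perm _ _ _).nodup_iff).mpr (PySem.Set.nodup_ofList _))).imp
      (fun h => lt_of_le_of_ne h.1 (Ne.symm h.2))
  · -- every word's count occurs among the bucket keys
    intro w hw
    rw [PySem.List.mem_sorted]
    exact (PySem.Set.mem_ofList _ _).mpr (List.mem_map.mpr ⟨w, hw, rfl⟩)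

-- ===== VERDICT (by name: the statement is the Claim_ definition above) =====
theorem encode_words_spec : Claim_equal_encode_words := by
  intro words tweets_split _hdom _hpre
  show encode_words words tweets_split = encode_words_alt words tweets_split
  simp only [encode_words, encode_words_alt]
  rw [← vocab_eq words]
  simp only [PySem.List.foldl_append_singleton_eq_map, List.nil_append]
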